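-- pv_equiv track=rewrite | github.com/kaohl/masters-thesis-software-evaluation | collect_hot_methods.py | get_method_count
-- ===== SOURCE A (Python) =====
-- def get_method_count(method_line__count):
--     method__count = dict() # method => count
--     for (m, l), c in method_line__count.items():
--         if not m in method__count:
--             method__count[m] = c
--         else:
--             method__count[m] = method__count[m] + c
--     return method__count
-- ===== SOURCE B (Python) =====
-- def get_method_count(method_line__count):
--     items = list(method_line__count.items())
--     methods = list(dict.fromkeys(m for (m, l), c in items))
--     return {m: sum(c for (m2, l), c in items if m2 == m) for m in methods}
-- ===== Notes on version B (the rewrite author's own statement) =====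
-- stated objective: alternative
-- what changed: B replaces A's single hash-accumulation pass (dict updated in place per item) with a two-phase grouped reduction: first the distinct methods in first-occurrence order, then one comprehension summing each method's counts over the items.
import Mathlib
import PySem

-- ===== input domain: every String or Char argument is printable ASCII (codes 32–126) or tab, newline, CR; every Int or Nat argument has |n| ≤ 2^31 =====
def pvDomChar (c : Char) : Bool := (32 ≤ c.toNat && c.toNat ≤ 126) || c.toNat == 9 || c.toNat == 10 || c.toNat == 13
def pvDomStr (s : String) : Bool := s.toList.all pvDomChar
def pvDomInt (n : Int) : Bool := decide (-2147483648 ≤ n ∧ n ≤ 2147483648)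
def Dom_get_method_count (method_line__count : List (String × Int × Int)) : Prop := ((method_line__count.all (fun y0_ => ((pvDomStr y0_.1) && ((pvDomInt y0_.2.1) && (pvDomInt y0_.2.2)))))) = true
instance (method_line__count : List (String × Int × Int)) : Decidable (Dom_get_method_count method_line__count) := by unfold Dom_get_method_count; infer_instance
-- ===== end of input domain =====

-- B aggregates by a two-phase grouped reduction (distinct methods, then per-method sums) instead of A's in-place dict accumulation; objective: alternative decomposition.

-- ===== PORT A =====
def get_method_count (method_line__count : List (String × Int × Int)) : List (String × Int) :=
  (method_line__count.foldl
    (fun d p =>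
      if d.contains p.1 = false then d.insert p.1 p.2.2
      else d.insert p.1 (d.getD p.1 0 + p.2.2))
    (PySem.Dict.empty : PySem.Dict String Int)).items

-- ===== PORT B =====
def get_method_count_alt (method_line__count : List (String × Int × Int)) : List (String × Int) :=
  (PySem.List.dedup (method_line__count.map (·.1))).map
    (fun m => (m, ((method_line__count.filter (fun p => p.1 == m)).map (fun p => p.2.2)).sum))

-- ===== PRECONDITION & SPEC =====
def Spec_get_method_count (method_line__count : List (String × Int × Int)) (out : List (String × Int)) : Prop := out = get_method_count_alt method_line__count
instance (method_line__count : List (String × Int × Int)) (out : List (String × Int)) : Decidable (Spec_get_method_count method_line__count out) := by unfold Spec_get_method_count; infer_instance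

-- ===== CLAIM (what is proved, stated in full; the proofs are below) =====
def Claim_equal_get_method_count : Prop := ∀ (method_line__count : List (String × Int × Int)), Dom_get_method_count method_line__count → Spec_get_method_count method_line__count (get_method_count method_line__count)

-- ===== LEMMAS AND PROOFS =====

-- A's loop body always stores the running total: in the fresh-key branch getD is 0.
theorem pvStep_eq (d : PySem.Dict String Int) (p : String × Int × Int) :
    (if d.contains p.1 = false then d.insert p.1 p.2.2
     else d.insert p.1 (d.getD p.1 0 + p.2.2))
    = d.insert p.1 (d.getD p.1 0 + p.2.2) := by
  by_cases h : d.contains p.1 = false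
  · rw [if_pos h, PySem.Dict.getD_of_not_contains d (0:Int) h, zero_add]
  · rw [if_neg h]

theorem pvFold_eq (l : List (String × Int × Int)) (d : PySem.Dict String Int) :
    l.foldl (fun d p =>
      if d.contains p.1 = false then d.insert p.1 p.2.2
      else d.insert p.1 (d.getD p.1 0 + p.2.2)) d
    = l.foldl (fun d p => d.insert p.1 (d.getD p.1 0 + p.2.2)) d := by
  congr 1
  funext d p
  exact pvStep_eq d p

theorem pvFold_getD (l : List (String × Int × Int)) (d : PySem.Dict String Int) (m : String) :
    (l.foldl (fun d p => d.insert p.1 (d.getD p.1 0 + p.2.2)) d).getD m 0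
    = d.getD m 0 + ((l.filter (fun p => p.1 == m)).map (fun p => p.2.2)).sum := by
  induction l generalizing d with
  | nil => simp
  | cons p l ih =>
    simp only [List.foldl_cons, ih, List.filter_cons]
    by_cases h : p.1 = m
    · simp [h]
      ring
    · rw [PySem.Dict.getD_insert_of_ne d _ (0:Int) (Ne.symm h)]
      simp [h]

theorem pvFold_keys (l : List (String × Int × Int)) :
    (l.foldl (fun d p => d.insert p.1 (d.getD p.1 0 + p.2.2))
      (PySem.Dict.empty : PySem.Dict String Int)).keys
    = PySem.List.dedup (l.map (·.1)) := by
  rw [PySem.Dict.keys_foldl_insert_key l (fun p => p.1)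
      (fun d p => d.getD p.1 0 + p.2.2) PySem.Dict.empty]
  simp [PySem.Dict.keys_empty, PySem.Set.update_nil_left]

theorem pvFold_nodup (l : List (String × Int × Int)) :
    (l.foldl (fun d p => d.insert p.1 (d.getD p.1 0 + p.2.2))
      (PySem.Dict.empty : PySem.Dict String Int)).keys.Nodup := by
  exact PySem.Dict.nodup_keys_foldl_insert_key l (fun p => p.1) (fun d p => d.getD p.1 0 + p.2.2) PySem.Dict.empty PySem.Dict.nodup_keys_empty

-- ===== VERDICT (by name: the statement is the Claim_ definition above) =====
theorem get_method_count_spec : Claim_equal_get_method_count := by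
  intro l _
  unfold Spec_get_method_count get_method_count get_method_count_alt
  rw [pvFold_eq]
  rw [PySem.Dict.items_eq_map_keys _ (pvFold_nodup l) 0, pvFold_keys]
  apply List.map_congr_left
  intro m _
  rw [pvFold_getD]
  simp [PySem.Dict.getD_empty]
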